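-- pv_equiv track=rewrite | github.com/alkazarassociates/EPADonationMatch | mail_merge.py | html_from_template
-- ===== SOURCE A (Python) =====
-- def html_from_template(template, data):
--     # Only substitute in <body>...</body>
--     pos = template.find('<body') + 5
--     ret = template[:pos]
--     while True:
--         replacement_start = template.find('{', pos)
--         if replacement_start == -1:
--             ret += template[pos:]
--             break
--         ret += template[pos:replacement_start]
--         pos = template.find('}', replacement_start)+1
--         key = template[replacement_start+1:pos-1].strip()
--         ret += data[key]
--     return ret
-- ===== SOURCE B (Python) =====
-- import re
--
-- def html_from_template(template, data):
--     # Only substitute in <body>...</body>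
--     pos = template.find('<body') + 5
--     return template[:pos] + re.sub(
--         r'\{([^}]*)\}',
--         lambda m: data[m.group(1).strip()],
--         template[pos:])
-- ===== Notes on version B (the rewrite author's own statement) =====
-- stated objective: idiomatic
-- what changed: A's manual find-cursor loop with repeated string concatenation is replaced by a single re.sub with a callback over the part after '<body': the regex engine does the scanning and splicing, there is no explicit loop or cursor left.
import Mathlib
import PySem

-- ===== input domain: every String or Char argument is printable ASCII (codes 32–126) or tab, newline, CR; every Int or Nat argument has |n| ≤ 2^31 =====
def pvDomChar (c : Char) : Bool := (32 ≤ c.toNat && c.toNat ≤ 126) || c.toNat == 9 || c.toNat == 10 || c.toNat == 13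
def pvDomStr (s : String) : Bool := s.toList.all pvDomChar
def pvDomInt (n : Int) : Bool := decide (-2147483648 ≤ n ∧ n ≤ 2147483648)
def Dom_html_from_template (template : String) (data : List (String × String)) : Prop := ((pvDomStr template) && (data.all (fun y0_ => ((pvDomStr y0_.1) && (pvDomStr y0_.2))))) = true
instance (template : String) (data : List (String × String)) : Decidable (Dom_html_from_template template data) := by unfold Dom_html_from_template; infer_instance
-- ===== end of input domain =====

-- B replaces A's manual find-cursor/concatenation loop by a single regex substitution
-- (re.sub with a callback) applied to the part after '<body'; equivalence of the return
-- values is proved on Pre_ (every {key} token A's cursor visits is closed with a known key).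

-- ===== PORT A =====
-- A's 'while True' loop; fuel only makes the recursion total (Python's loop diverges on
-- an unclosed '{' when more substitutions than fuel allows occur — excluded by Pre_).
-- Where Python's data[key] raises KeyError (excluded by Pre_) the port substitutes "".
def pvALoop (template : String) (data : List (String × String)) :
    Nat → Int → String → String
  | 0, _, ret => ret
  | fuel+1, pos, ret =>
    let rs := PySem.Str.findFrom template "{" pos none
    if rs = -1 then
      ret ++ PySem.Str.slice template (some pos) none
    else
      let ret2 := ret ++ PySem.Str.slice template (some pos) (some rs)
      let pos2 := PySem.Str.findFrom template "}" rs none + 1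
      let key := PySem.Str.strip (PySem.Str.slice template (some (rs+1)) (some (pos2-1)))
      pvALoop template data fuel pos2 (ret2 ++ ((data.lookup key).getD ""))

def html_from_template (template : String) (data : List (String × String)) : String :=
  let pos : Int := PySem.Str.find template "<body" + 5
  pvALoop template data (template.length + 1) pos (PySem.Str.slice template none (some pos))

-- ===== PORT B =====
-- Hand port of re.sub(r'\{([^}]*)\}', lambda m: data[m.group(1).strip()], s) — exact for
-- this pattern: a match is '{', the chars up to the first '}' (the key), then that '}';
-- a '{' with no '}' after it admits no match at or after it, so the rest is kept as is.
-- Where Python's data[...] raises KeyError (excluded by Pre_) the port substitutes "".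
def pvSub (data : List (String × String)) : List Char → List Char
  | [] => []
  | c :: rest =>
    if c = '{' then
      match h : rest.dropWhile (· ≠ '}') with
      | [] => c :: rest
      | _ :: after =>
        ((data.lookup (PySem.Str.strip (String.ofList (rest.takeWhile (· ≠ '}'))))).getD "").toList
          ++ pvSub data after
    else
      c :: pvSub data rest
termination_by l => l.length
decreasing_by
  · have h1 : (rest.dropWhile (· ≠ '}')).length ≤ rest.length := List.length_dropWhile_le _ _
    rw [h] at h1; simp at h1 ⊢; omega
  · simp

def html_from_template_alt (template : String) (data : List (String × String)) : String :=
  let pos : Int := PySem.Str.find template "<body" + 5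
  PySem.Str.slice template none (some pos) ++
    String.ofList (pvSub data (PySem.Str.slice template (some pos) none).toList)

-- ===== PRECONDITION & SPEC =====
-- Pre_ excludes exactly the inputs on which A raises or diverges: among the '{' positions
-- A's cursor actually visits — a '{' at or after template.find('<body')+5 is visited iff
-- every earlier such '{' has a '}' strictly between them (otherwise it lies inside another
-- token's key and A skips it) — some visited '{' has no later '}' (A then loops forever or
-- raises KeyError on a garbled key) or its key, stripped, is not a key of data (KeyError).
-- pvVisited template i: the '{' at index i is one A's cursor reaches (every earlier '{'
-- at or after the substitution start has a '}' strictly between it and i)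
def pvVisited (template : String) (i : Nat) : Bool :=
  decide (∀ j < i, (PySem.Str.find template "<body" + 5).toNat ≤ j →
      template.toList.getD j ' ' = '{' →
      '}' ∈ (template.toList.drop (j+1)).take (i - (j+1)))
def Pre_html_from_template (template : String) (data : List (String × String)) : Prop :=
  ∀ i < template.toList.length,
    ((PySem.Str.find template "<body" + 5).toNat ≤ i ∧
     template.toList.getD i ' ' = '{' ∧
     pvVisited template i = true) →
    ('}' ∈ template.toList.drop (i+1)) ∧
    (data.lookup (PySem.Str.strip (String.ofList
        ((template.toList.drop (i+1)).takeWhile (· ≠ '}'))))).isSome = true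
instance (template : String) (data : List (String × String)) : Decidable (Pre_html_from_template template data) := by unfold Pre_html_from_template; infer_instance

def pvWitness_html_from_template : String × (List (String × String)) :=
  ("<body>Dear { name }, hi.</body>", [("name", "Ada")])

def Spec_html_from_template (template : String) (data : List (String × String)) (out : String) : Prop := out = html_from_template_alt template data
instance (template : String) (data : List (String × String)) (out : String) : Decidable (Spec_html_from_template template data out) := by unfold Spec_html_from_template; infer_instance

-- ===== CLAIM (what is proved, stated in full; the proofs are below) =====
def Claim_equal_html_from_template : Prop := ∀ (template : String) (data : List (String × String)), Dom_html_from_template template data → Pre_html_from_template template data → Spec_html_from_template template data (html_from_template template data)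

-- ===== LEMMAS AND PROOFS =====

-- the first position of c in cs is the length of the c-free prefix
lemma pv_tw_first (c : Char) (cs : List Char) (h : c ∈ cs) :
    cs[(cs.takeWhile (· ≠ c)).length]? = some c ∧
      ∀ i < (cs.takeWhile (· ≠ c)).length, cs[i]? ≠ some c := by
  induction cs with
  | nil => simp at h
  | cons a l ih =>
    by_cases ha : a = c
    · subst ha; simp
    · have hc : c ∈ l := by
        rcases List.mem_cons.mp h with h' | h'
        · exact absurd h'.symm ha
        · exact h'
      obtain ⟨h1, h2⟩ := ih hc
      refine ⟨by simpa [ha] using h1, ?_⟩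
      intro i hi
      rw [List.takeWhile_cons_of_pos (by simpa using ha)] at hi
      cases i with
      | zero => simpa using ha
      | succ j => simpa using h2 j (by simpa using hi)

lemma pv_take_takeWhile (p : Char → Bool) (l : List Char) :
    l.take (l.takeWhile p).length = l.takeWhile p := by
  induction l with
  | nil => simp
  | cons a l ih => by_cases h : p a <;> simp [h, ih]

lemma pv_find_singleton (cs : List Char) (c : Char) :
    PySem.Chars.find cs [c] =
      if c ∈ cs then ((cs.takeWhile (· ≠ c)).length : Int) else -1 := by
  by_cases h : c ∈ cs
  · have hin : [c] <:+: cs := (List.singleton_infix_iff c cs).mpr h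
    have h0 : 0 ≤ PySem.Chars.find cs [c] := (PySem.Chars.find_nonneg_iff cs [c]).mpr hin
    obtain ⟨hpre, hmin⟩ := PySem.Chars.find_spec h0
    obtain ⟨hget, hlt⟩ := pv_tw_first c cs h
    set f := (PySem.Chars.find cs [c]).toNat with hf
    set t := (cs.takeWhile (· ≠ c)).length with ht
    have hfc : cs[f]? = some c := by
      rcases hpre with ⟨s, hs⟩
      have : (cs.drop f).head? = some c := by rw [← hs]; simp
      rwa [List.head?_drop] at this
    have htf : ¬ t < f := fun hlt' => hmin t hlt' ⟨cs.drop (t+1), by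
      have : cs.drop t = c :: cs.drop (t+1) := by
        have htl : t < cs.length := (List.getElem?_eq_some_iff.mp hget).1
        rw [List.drop_eq_getElem_cons htl]
        have := List.getElem?_eq_some_iff.mp hget
        simp [this.2]
      simp [this]⟩
    have hft : ¬ f < t := fun hlt' => hlt f hlt' hfc
    have : f = t := by omega
    simp only [h, if_true]
    omega
  · rw [if_neg h]
    exact (PySem.Chars.find_eq_neg_one_iff cs [c]).mpr
      (fun hin => h ((List.singleton_infix_iff c cs).mp hin))

-- pvSub passes brace-free text through unchanged
lemma pv_sub_skip (data : List (String × String)) (t rest : List Char) (h : '{' ∉ t) :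
    pvSub data (t ++ rest) = t ++ pvSub data rest := by
  induction t with
  | nil => simp
  | cons a t ih =>
    have ha : a ≠ '{' := fun hc => h (hc ▸ List.mem_cons_self)
    have ht : '{' ∉ t := fun hc => h (List.mem_cons_of_mem _ hc)
    simp only [List.cons_append]
    rw [pvSub, if_neg ha, ih ht]

-- a String-level restatement of slices as list drops/takes
lemma pv_slice_from (s : String) (k : Nat) :
    PySem.Str.slice s (some (k : Int)) none = String.ofList (s.toList.drop k) := by
  rw [← String.ofList_toList (s := PySem.Str.slice s (some (k : Int)) none)]
  congr 1
  simp [pysem]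

lemma pv_slice_between (s : String) (a b : Nat) :
    PySem.Str.slice s (some (a : Int)) (some (b : Int)) =
      String.ofList ((s.toList.drop a).take (b - a)) := by
  rw [← String.ofList_toList (s := PySem.Str.slice s (some (a : Int)) (some (b : Int)))]
  congr 1
  simp [pysem]

lemma pv_dropWhile_eq_drop (p : Char → Bool) (l : List Char) :
    l.dropWhile p = l.drop (l.takeWhile p).length := by
  induction l with
  | nil => simp
  | cons a l ih => by_cases h : p a <;> simp [h, ih]

lemma pv_drop_cons (l : List Char) (n : Nat) (c : Char) (h : l[n]? = some c) :
    l.drop n = c :: l.drop (n+1) := by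
  have hn : n < l.length := (List.getElem?_eq_some_iff.mp h).1
  rw [List.drop_eq_getElem_cons hn, (List.getElem?_eq_some_iff.mp h).2]

-- pvSub at a '{' whose key is closed by a '}'
lemma pv_sub_cons_brace (data : List (String × String)) (rest after : List Char)
    (h : rest.dropWhile (· ≠ '}') = '}' :: after) :
    pvSub data ('{' :: rest) =
      ((data.lookup (PySem.Str.strip (String.ofList (rest.takeWhile (· ≠ '}'))))).getD "").toList
        ++ pvSub data after := by
  rw [pvSub, if_pos rfl]
  split
  next heq => rw [h] at heq; exact absurd heq (by simp)
  next x after' heq =>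
    rw [h] at heq
    cases heq
    rfl

-- the main loop invariant: A's cursor loop from k produces the regex substitution of the
-- suffix, assuming every '{' visited from cursor k is closed with a known key
lemma pv_aloop_eq (template : String) (data : List (String × String)) :
    ∀ fuel (k : Nat) (ret : String), k ≤ template.toList.length →
    (∀ i < template.toList.length, k ≤ i → template.toList.getD i ' ' = '{' →
      (∀ j < i, k ≤ j → template.toList.getD j ' ' = '{' →
          '}' ∈ (template.toList.drop (j+1)).take (i - (j+1))) →
      ('}' ∈ template.toList.drop (i+1)) ∧
      (data.lookup (PySem.Str.strip (String.ofList
          ((template.toList.drop (i+1)).takeWhile (· ≠ '}'))))).isSome = true) →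
    template.toList.length - k < 2 * fuel →
    pvALoop template data fuel (k : Int) ret =
      ret ++ String.ofList (pvSub data (template.toList.drop k)) := by
  intro fuel
  induction fuel with
  | zero => intro k ret hk hpre hfuel; omega
  | succ fuel ih =>
    intro k ret hk hpre hfuel
    have hrs : PySem.Str.findFrom template "{" (k : Int) none =
        if PySem.Chars.find (template.toList.drop k) ['{'] = -1 then -1
        else (k : Int) + PySem.Chars.find (template.toList.drop k) ['{'] := by
      have := PySem.Chars.findFrom_natCast template.toList ("{".toList) k (by simpa using hk)
      simpa using this
    rw [pv_find_singleton] at hrs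
    by_cases hmem : '{' ∈ template.toList.drop k
    · -- a further '{' exists: one substitution step, then the induction hypothesis
      set L := template.toList with hL
      set t := ((L.drop k).takeWhile (· ≠ '{')).length with ht
      obtain ⟨hT1, hT2⟩ := pv_tw_first '{' (L.drop k) hmem
      rw [if_pos hmem] at hrs
      have htlen : t < L.length - k := by
        have h2 := (List.getElem?_eq_some_iff.mp hT1).1
        simpa only [List.length_drop] using h2
      set j := k + t with hjdef
      have hjget : L[j]? = some '{' := by
        rw [← List.getElem?_drop]; exact hT1
      have hjlt : j < L.length := (List.getElem?_eq_some_iff.mp hjget).1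
      -- j is the first '{' at index ≥ k, so the "visited" side condition is vacuous
      have hvac : ∀ j' < j, k ≤ j' → L.getD j' ' ' = '{' →
          '}' ∈ (L.drop (j'+1)).take (j - (j'+1)) := by
        intro j' hj' hkj' hgd
        exfalso
        have hj'lt : j' < L.length := by omega
        have hg : L[j']? = some '{' := by
          rw [List.getElem?_eq_getElem hj'lt]
          rw [List.getD_eq_getElem?_getD, List.getElem?_eq_getElem hj'lt] at hgd
          simpa using hgd
        have := hT2 (j' - k) (by omega)
        rw [List.getElem?_drop, show k + (j' - k) = j' by omega] at this
        exact this hg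
      obtain ⟨hcl, hkey⟩ := hpre j hjlt (by omega)
        (by rw [List.getD_eq_getElem?_getD, hjget]; rfl) hvac
      set rest := L.drop (j + 1) with hrest
      set u := (rest.takeWhile (· ≠ '}')).length with hu
      obtain ⟨hR1, _⟩ := pv_tw_first '}' rest hcl
      have hulen : u < L.length - (j + 1) := by
        have h2 := (List.getElem?_eq_some_iff.mp hR1).1
        rw [hrest] at h2
        simpa only [List.length_drop] using h2
      -- the suffix at the '{'
      have hdropj : L.drop j = '{' :: rest := pv_drop_cons L j '{' hjget
      -- the '}' closing the token, at index j+u+1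
      have hclose : L[j+u+1]? = some '}' := by
        rw [show j+u+1 = (j+1)+u by omega, ← List.getElem?_drop, ← hrest]
        exact hR1
      -- the second find
      have hfind2 : PySem.Chars.find (L.drop j) ['}'] = ((u + 1 : Nat) : Int) := by
        rw [pv_find_singleton, if_pos (by rw [hdropj]; exact List.mem_cons_of_mem _ hcl)]
        rw [hdropj, List.takeWhile_cons_of_pos (by decide)]
        push_cast
        simp [hu]
      have hf2 : PySem.Str.findFrom template "}" (j : Int) none =
          if PySem.Chars.find (template.toList.drop j) ['}'] = -1 then -1
          else (j : Int) + PySem.Chars.find (template.toList.drop j) ['}'] := by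
        have := PySem.Chars.findFrom_natCast template.toList ("}".toList) j
          (by simp [← hL]; omega)
        simpa using this
      have hpos2 : PySem.Str.findFrom template "}" (j : Int) none + 1 =
          ((j + u + 2 : Nat) : Int) := by
        rw [hf2, ← hL, hfind2]
        rw [if_neg (show ¬(((u + 1 : Nat) : Int) = -1) by omega)]
        push_cast
        ring
      -- take one loop step
      rw [pvALoop]
      have hrs' : PySem.Str.findFrom template "{" (k : Int) none = ((j : Nat) : Int) := by
        rw [hrs]
        rw [if_neg (show ¬(((t : Nat) : Int) = -1) by omega)]
        rw [hjdef]
        push_cast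
        ring
      simp only [hrs']
      rw [if_neg (show ¬(((j : Nat) : Int) = -1) by omega)]
      rw [hpos2]
      -- the key string A extracts is the takeWhile key
      have hkeyA : PySem.Str.slice template (some (((j : Nat) : Int) + 1))
            (some (((j + u + 2 : Nat) : Int) - 1)) =
          String.ofList (rest.takeWhile (· ≠ '}')) := by
        rw [show (((j : Nat) : Int) + 1) = ((j + 1 : Nat) : Int) by push_cast; ring,
          show (((j + u + 2 : Nat) : Int) - 1) = ((j + u + 1 : Nat) : Int) by push_cast; ring]
        rw [pv_slice_between, ← hL]
        congr 1
        rw [← hrest, show j + u + 1 - (j + 1) = u by omega, hu]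
        exact pv_take_takeWhile _ _
      rw [hkeyA]
      -- the lookup succeeds
      obtain ⟨v, hv⟩ := Option.isSome_iff_exists.mp hkey
      -- the invariant transfers to the new cursor j+u+2: a '{' visited from there is
      -- visited from k (earlier '{'s below j+u+2 are closed by the '}' at j+u+1)
      have hpre' : ∀ i < L.length, j + u + 2 ≤ i → L.getD i ' ' = '{' →
          (∀ j' < i, j + u + 2 ≤ j' → L.getD j' ' ' = '{' →
              '}' ∈ (L.drop (j'+1)).take (i - (j'+1))) →
          ('}' ∈ L.drop (i+1)) ∧
          (data.lookup (PySem.Str.strip (String.ofList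
              ((L.drop (i+1)).takeWhile (· ≠ '}'))))).isSome = true := by
        intro i hi hk2i hgd hloc
        refine hpre i hi (by omega) hgd ?_
        intro j' hj'i hkj' hgd'
        by_cases hc : j + u + 2 ≤ j'
        · exact hloc j' hj'i hc hgd'
        · have hne : j' ≠ j + u + 1 := by
            intro he
            rw [he, List.getD_eq_getElem?_getD, hclose] at hgd'
            exact absurd hgd' (by decide)
          refine List.mem_iff_getElem?.mpr ⟨j + u + 1 - (j' + 1), ?_⟩
          rw [List.getElem?_take, if_pos (by omega), List.getElem?_drop,
            show j' + 1 + (j + u + 1 - (j' + 1)) = j + u + 1 by omega]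
          exact hclose
      -- apply the induction hypothesis at the new cursor
      rw [ih (j + u + 2) _ (by omega) hpre' (by omega)]
      -- B's side: split the suffix at the token
      have hsplit : L.drop k = ((L.drop k).takeWhile (· ≠ '{')) ++ ('{' :: rest) := by
        conv_lhs => rw [← List.takeWhile_append_dropWhile (p := (· ≠ '{')) (l := L.drop k)]
        congr 1
        rw [pv_dropWhile_eq_drop, ← ht, List.drop_drop, ← hjdef, hdropj]
      have hnb : '{' ∉ (L.drop k).takeWhile (· ≠ '{') := fun hmem' => by
        simpa using List.mem_takeWhile_imp hmem'
      have hdw : rest.dropWhile (· ≠ '}') = '}' :: rest.drop (u + 1) := by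
        rw [pv_dropWhile_eq_drop, ← hu, pv_drop_cons rest u '}' hR1]
      have hrw : rest.drop (u + 1) = L.drop (j + u + 2) := by
        rw [hrest, List.drop_drop]
        congr 1
        omega
      conv_rhs => rw [hsplit, pv_sub_skip data _ _ hnb,
        pv_sub_cons_brace data rest (rest.drop (u + 1)) hdw, hrw]
      -- assemble the strings
      rw [pv_slice_between, ← hL, show j - k = t from by omega, ht,
        pv_take_takeWhile, hv]
      simp [String.ofList_append, String.append_assoc]
    · -- no further '{': A appends the tail, B keeps it unchanged
      rw [if_neg hmem] at hrs
      have hrs' : PySem.Str.findFrom template "{" (k : Int) none = -1 := by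
        rw [hrs]
        simp
      rw [pvALoop]
      simp only [hrs']
      rw [if_pos trivial]
      have hsub : pvSub data (template.toList.drop k) = template.toList.drop k := by
        have h2 := pv_sub_skip data (template.toList.drop k) [] hmem
        simpa [pvSub] using h2
      rw [pv_slice_from, hsub]

-- ===== VERDICT (by name: the statement is the Claim_ definition above) =====
theorem html_from_template_spec : Claim_equal_html_from_template := by
  unfold Claim_equal_html_from_template
  intro template data _hdom hpre
  unfold Spec_html_from_template html_from_template html_from_template_alt
  have hp0 : 0 ≤ PySem.Str.find template "<body" + 5 := by
    have := PySem.Chars.neg_one_le_find template.toList ("<body".toList)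
    simp only [PySem.Str.find_eq]
    omega
  set p : Int := PySem.Str.find template "<body" + 5 with hp
  have hpn : p = ((p.toNat : Nat) : Int) := (Int.toNat_of_nonneg hp0).symm
  have hlen : template.length = template.toList.length := by simp
  by_cases hle : p.toNat ≤ template.toList.length
  · have hpre' : ∀ i < template.toList.length, p.toNat ≤ i →
        template.toList.getD i ' ' = '{' →
        (∀ j < i, p.toNat ≤ j → template.toList.getD j ' ' = '{' →
            '}' ∈ (template.toList.drop (j+1)).take (i - (j+1))) →
        ('}' ∈ template.toList.drop (i+1)) ∧
        (data.lookup (PySem.Str.strip (String.ofList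
            ((template.toList.drop (i+1)).takeWhile (· ≠ '}'))))).isSome = true := by
      intro i hi hsi hgd hvac
      refine hpre i hi ⟨hsi, hgd, ?_⟩
      unfold pvVisited
      rw [← hp]
      exact decide_eq_true hvac
    rw [hpn, pv_aloop_eq template data (template.length + 1) p.toNat _ hle hpre' (by omega)]
    simp only [pv_slice_from, String.toList_ofList]
  · have hfrom : PySem.Str.findFrom template "{" p none = -1 := by
      simp only [PySem.Str.findFrom_eq, PySem.Chars.findFrom]
      rw [if_neg (show ¬ p < 0 by omega)]
      rw [if_pos (show (template.toList.length : Int) < p by omega)]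
    rw [pvALoop]
    simp only [hfrom]
    rw [if_pos trivial]
    have hnil : PySem.Str.slice template (some p) none = String.ofList [] := by
      rw [hpn, pv_slice_from]
      congr 1
      exact List.drop_eq_nil_of_le (by omega)
    rw [hnil]
    simp [pvSub]
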